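-- pv_equiv track=rewrite | github.com/JaroslavHolecek/SPS_for_students | 2022_EPB/Auticko/mapa_vzdalenost.py | vzdalenosti_od_okraju_a_prekazek
-- ===== SOURCE A (Python) =====
-- from enum import Enum
--
-- class MapElement(Enum):
--     CIL = 0
--     CESTA = 1
--     START = 2
--     PREKAZKA = 9
--
--     def __str__(self):
--         return self.name.lower()
--
-- def vzdalenosti_od_okraju_a_prekazek(mapa: list[list[int]]) -> list[list[dict]]:
--     vyska = len(mapa)
--     sirka = len(mapa[0])
--     vysledky = [[{'up': 0, 'down': 0, 'left': 0, 'right': 0} for _ in range(sirka)] for _ in range(vyska)]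
--
--     for y in range(vyska):
--         for x in range(sirka):
--             if mapa[y][x] == MapElement.PREKAZKA.value:
--                 continue  # Překážka sama nemá smysl měřit
--
--             # Nahoru
--             vzd = 0
--             for ny in range(y - 1, -1, -1):
--                 if mapa[ny][x] == MapElement.PREKAZKA.value:
--                     break
--                 vzd += 1
--             vysledky[y][x]['up'] = vzd
--
--             # Dolů
--             vzd = 0
--             for ny in range(y + 1, vyska):
--                 if mapa[ny][x] == MapElement.PREKAZKA.value:
--                     break
--                 vzd += 1
--             vysledky[y][x]['down'] = vzd
--
--             # Vlevo
--             vzd = 0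
--             for nx in range(x - 1, -1, -1):
--                 if mapa[y][nx] == MapElement.PREKAZKA.value:
--                     break
--                 vzd += 1
--             vysledky[y][x]['left'] = vzd
--
--             # Vpravo
--             vzd = 0
--             for nx in range(x + 1, sirka):
--                 if mapa[y][nx] == MapElement.PREKAZKA.value:
--                     break
--                 vzd += 1
--             vysledky[y][x]['right'] = vzd
--
--     return vysledky
-- ===== SOURCE B (Python) =====
-- def _sweep(vals):
--     res = []
--     c = 0
--     for v in vals:
--         if v == 9:
--             res.append(0)
--             c = 0
--         else:
--             res.append(c)
--             c += 1
--     return res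
--
-- def vzdalenosti_od_okraju_a_prekazek(mapa: list[list[int]]) -> list[list[dict]]:
--     sirka = len(mapa[0])
--     rows = [row[:sirka] for row in mapa]
--     lefts = [_sweep(r) for r in rows]
--     rights = [_sweep(r[::-1])[::-1] for r in rows]
--     cols = [[r[x] for r in rows] for x in range(sirka)]
--     ups = [_sweep(c) for c in cols]
--     downs = [_sweep(c[::-1])[::-1] for c in cols]
--     return [[{'up': ups[x][y], 'down': downs[x][y],
--               'left': lefts[y][x], 'right': rights[y][x]}
--              for x in range(sirka)]
--             for y in range(len(mapa))]
-- ===== Notes on version B (the rewrite author's own statement) =====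
-- stated objective: faster
-- what changed: Replaced the per-cell scans in all four directions by four linear prefix sweeps (one per direction over rows and columns) that keep a running distance counter reset at obstacles, then assemble the result by lookup.
import Mathlib
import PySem

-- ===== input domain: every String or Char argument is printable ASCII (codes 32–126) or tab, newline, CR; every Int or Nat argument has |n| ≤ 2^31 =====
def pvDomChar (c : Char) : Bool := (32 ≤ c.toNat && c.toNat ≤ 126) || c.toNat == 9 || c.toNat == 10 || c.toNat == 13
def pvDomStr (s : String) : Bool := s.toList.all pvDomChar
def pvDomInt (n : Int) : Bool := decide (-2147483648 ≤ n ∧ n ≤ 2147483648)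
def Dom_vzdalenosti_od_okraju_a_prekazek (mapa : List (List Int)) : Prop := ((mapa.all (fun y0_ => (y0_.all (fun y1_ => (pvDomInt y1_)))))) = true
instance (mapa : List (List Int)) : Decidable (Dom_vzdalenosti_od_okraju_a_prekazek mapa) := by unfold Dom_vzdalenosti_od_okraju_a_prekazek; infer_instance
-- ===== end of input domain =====

-- B replaces A's per-cell directional scans (O(V·S·(V+S))) by four linear sweeps with a
-- running counter reset at obstacles (O(V·S)); same return value on all of Pre_.

-- ===== PORT A =====
-- mapa[i][j] (both indexings in-range under Pre_; default is never taken there)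
def pvCellA (mapa : List (List Int)) (i j : Int) : Int :=
  PySem.List.pyGetD (PySem.List.pyGetD mapa i []) j 0

-- 'vzd = 0; for i in idxs: if v == 9: break; vzd += 1' over the list of scanned values
def pvLoopA : List Int → Int → Int
  | [], vzd => vzd
  | v :: t, vzd => if v = 9 then vzd else pvLoopA t (vzd + 1)

def vzdalenosti_od_okraju_a_prekazek (mapa : List (List Int)) : List (List (List (String × Int))) :=
  let vyska : Int := (mapa.length : Int)
  let sirka : Int := ((PySem.List.pyGetD mapa 0 []).length : Int)
  (PySem.List.pyRange 0 vyska 1).map (fun y =>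
    (PySem.List.pyRange 0 sirka 1).map (fun x =>
      if pvCellA mapa y x = 9 then
        [("up", (0 : Int)), ("down", (0 : Int)), ("left", (0 : Int)), ("right", (0 : Int))]
      else
        [("up", pvLoopA ((PySem.List.pyRange (y - 1) (-1) (-1)).map (fun ny => pvCellA mapa ny x)) 0),
         ("down", pvLoopA ((PySem.List.pyRange (y + 1) vyska 1).map (fun ny => pvCellA mapa ny x)) 0),
         ("left", pvLoopA ((PySem.List.pyRange (x - 1) (-1) (-1)).map (fun nx => pvCellA mapa y nx)) 0),
         ("right", pvLoopA ((PySem.List.pyRange (x + 1) sirka 1).map (fun nx => pvCellA mapa y nx)) 0)]))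

-- ===== PORT B =====
-- _sweep: running distance counter, reset at obstacles
def pvSweep : List Int → Int → List Int
  | [], _ => []
  | v :: t, c => if v = 9 then 0 :: pvSweep t 0 else c :: pvSweep t (c + 1)

def pvAtB (m : List (List Int)) (i j : Int) : Int :=
  PySem.List.pyGetD (PySem.List.pyGetD m i []) j 0

def vzdalenosti_od_okraju_a_prekazek_alt (mapa : List (List Int)) : List (List (List (String × Int))) :=
  let sirka : Int := ((PySem.List.pyGetD mapa 0 []).length : Int)
  let rows : List (List Int) := mapa.map (fun r => PySem.List.slice r none (some sirka))
  let lefts := rows.map (fun r => pvSweep r 0)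
  let rights := rows.map (fun r => (pvSweep r.reverse 0).reverse)
  let cols := (PySem.List.pyRange 0 sirka 1).map (fun x => rows.map (fun r => PySem.List.pyGetD r x 0))
  let ups := cols.map (fun c => pvSweep c 0)
  let downs := cols.map (fun c => (pvSweep c.reverse 0).reverse)
  (PySem.List.pyRange 0 (mapa.length : Int) 1).map (fun y =>
    (PySem.List.pyRange 0 sirka 1).map (fun x =>
      [("up", pvAtB ups x y), ("down", pvAtB downs x y),
       ("left", pvAtB lefts y x), ("right", pvAtB rights y x)]))

-- ===== PRECONDITION & SPEC =====
-- Exactly where A returns: on an empty map A's first-row lookup raises IndexError, and when any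
-- row is shorter than the first row the outer per-cell lookup raises IndexError.
def Pre_vzdalenosti_od_okraju_a_prekazek (mapa : List (List Int)) : Prop :=
  mapa ≠ [] ∧ ∀ r ∈ mapa, (mapa.headD []).length ≤ r.length
instance (mapa : List (List Int)) : Decidable (Pre_vzdalenosti_od_okraju_a_prekazek mapa) := by
  unfold Pre_vzdalenosti_od_okraju_a_prekazek; infer_instance
def pvWitness_vzdalenosti_od_okraju_a_prekazek : List (List Int) := [[1, 9], [0, 0]]

def Spec_vzdalenosti_od_okraju_a_prekazek (mapa : List (List Int)) (out : List (List (List (String × Int)))) : Prop := out = vzdalenosti_od_okraju_a_prekazek_alt mapa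
instance (mapa : List (List Int)) (out : List (List (List (String × Int)))) : Decidable (Spec_vzdalenosti_od_okraju_a_prekazek mapa out) := by unfold Spec_vzdalenosti_od_okraju_a_prekazek; infer_instance

-- ===== CLAIM (what is proved, stated in full; the proofs are below) =====
def Claim_equal_vzdalenosti_od_okraju_a_prekazek : Prop := ∀ (mapa : List (List Int)), Dom_vzdalenosti_od_okraju_a_prekazek mapa → Pre_vzdalenosti_od_okraju_a_prekazek mapa → Spec_vzdalenosti_od_okraju_a_prekazek mapa (vzdalenosti_od_okraju_a_prekazek mapa)

-- ===== LEMMAS AND PROOFS =====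

-- distance scanned until the first obstacle (or the end of the scan list)
def pvCnt : List Int → Int
  | [] => 0
  | v :: t => if v = 9 then 0 else pvCnt t + 1

-- the cell value, the column at x, and the (width-truncated) row at y, as the proofs see them
def pvCell (mapa : List (List Int)) (y x : Nat) : Int := (mapa.getD y []).getD x 0
def pvCol (mapa : List (List Int)) (x : Nat) : List Int := mapa.map (fun r => r.getD x 0)
def pvRow (mapa : List (List Int)) (W y : Nat) : List Int := (mapa.getD y []).take W

-- the common value of both programs
def pvGrid (mapa : List (List Int)) : List (List (List (String × Int))) :=
  (List.range mapa.length).map (fun y =>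
    (List.range (mapa.getD 0 []).length).map (fun x =>
      if pvCell mapa y x = 9 then
        [("up", (0 : Int)), ("down", (0 : Int)), ("left", (0 : Int)), ("right", (0 : Int))]
      else
        [("up", pvCnt ((pvCol mapa x).take y).reverse),
         ("down", pvCnt ((pvCol mapa x).drop (y + 1))),
         ("left", pvCnt ((pvRow mapa (mapa.getD 0 []).length y).take x).reverse),
         ("right", pvCnt ((pvRow mapa (mapa.getD 0 []).length y).drop (x + 1)))]))

theorem pvLoopA_cnt (l : List Int) (c : Int) : pvLoopA l c = c + pvCnt l := by
  induction l generalizing c with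
  | nil => simp [pvLoopA, pvCnt]
  | cons v t ih => simp only [pvLoopA, pvCnt]; split <;> simp [ih]; ring

theorem pvSweep_length (l : List Int) (c : Int) : (pvSweep l c).length = l.length := by
  induction l generalizing c with
  | nil => simp [pvSweep]
  | cons v t ih => simp only [pvSweep]; split <;> simp [ih]

theorem pvSweep_spec (l p : List Int) :
    pvSweep l (pvCnt p) =
      (List.range l.length).map (fun j => if l.getD j 0 = 9 then 0 else pvCnt ((l.take j).reverse ++ p)) := by
  induction l generalizing p with
  | nil => simp [pvSweep]
  | cons v t ih =>
    have key : pvSweep (v :: t) (pvCnt p) = (if v = 9 then (0 : Int) else pvCnt p) :: pvSweep t (pvCnt (v :: p)) := by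
      by_cases hv : v = 9 <;> simp [pvSweep, pvCnt, hv]
    rw [key, ih (v :: p)]
    rw [List.length_cons, List.range_succ_eq_map]
    simp only [List.map_cons, List.map_map]
    congr 1
    simp

theorem pvSweep_getD (l : List Int) (j : Nat) (hj : j < l.length) :
    (pvSweep l 0).getD j 0 = if l.getD j 0 = 9 then 0 else pvCnt (l.take j).reverse := by
  have hs := pvSweep_spec l []
  simp only [pvCnt, List.append_nil] at hs
  rw [hs, List.getD_eq_getElem?_getD, List.getElem?_map, List.getElem?_range hj]
  simp

theorem getD_reverse (xs : List Int) (j : Nat) (h : j < xs.length) :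
    xs.reverse.getD j 0 = xs.getD (xs.length - 1 - j) 0 := by
  rw [List.getD_eq_getElem?_getD, List.getD_eq_getElem?_getD, List.getElem?_reverse h]

theorem pvSweep_rev_getD (l : List Int) (j : Nat) (hj : j < l.length) :
    ((pvSweep l.reverse 0).reverse).getD j 0 = if l.getD j 0 = 9 then 0 else pvCnt (l.drop (j + 1)) := by
  have hlen : (pvSweep l.reverse 0).length = l.length := by rw [pvSweep_length, List.length_reverse]
  rw [getD_reverse _ j (by omega), hlen,
      pvSweep_getD l.reverse (l.length - 1 - j) (by simp; omega)]
  have e1 : l.reverse.getD (l.length - 1 - j) 0 = l.getD j 0 := by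
    rw [getD_reverse l _ (by omega), show l.length - 1 - (l.length - 1 - j) = j by omega]
  have e2 : (l.reverse.take (l.length - 1 - j)).reverse = l.drop (j + 1) := by
    rw [List.take_reverse, List.reverse_reverse, show l.length - (l.length - 1 - j) = j + 1 by omega]
  rw [e1, e2]

theorem map_getD_range_take (l : List Int) (n : Nat) (h : n ≤ l.length) :
    (List.range n).map (fun k => l.getD k 0) = l.take n := by
  apply List.ext_getElem
  · simp [h]
  · intro i h1 h2
    simp at h1
    simp [List.getElem_take, List.getD_eq_getElem?_getD, List.getElem?_eq_getElem (by omega : i < l.length)]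

theorem map_pyGetD_up (l : List Int) (y : Nat) (hy : y ≤ l.length) :
    (PySem.List.pyRange ((y : Int) - 1) (-1) (-1)).map (fun i => PySem.List.pyGetD l i 0) =
      (l.take y).reverse := by
  rw [PySem.List.pyRange_neg_one_eq_reverse]
  rw [show (-1 : Int) + 1 = 0 by ring, show ((y : Int) - 1) + 1 = (y : Int) by ring]
  rw [List.map_reverse]
  congr 1
  rw [PySem.List.pyRange_one, List.map_map]
  rw [show ((y : Int) - 0).toNat = y by omega]
  rw [← map_getD_range_take l y hy]
  apply List.map_congr_left
  intro k hk
  simp [PySem.List.pyGetD_natCast]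

theorem map_pyGetD_down (l : List Int) (y : Nat) :
    (PySem.List.pyRange ((y : Int) + 1) (l.length : Int) 1).map (fun i => PySem.List.pyGetD l i 0) =
      l.drop (y + 1) := by
  have := PySem.List.map_pyGetD_pyRange l 0 (a := (y : Int) + 1) (by omega)
  simp only [PySem.List.len] at this
  rw [show ((y : Int) + 1).toNat = y + 1 by omega] at this
  exact this

theorem getD_take (l : List Int) (n k : Nat) (h : k < n) :
    (l.take n).getD k 0 = l.getD k 0 := by
  rw [List.getD_eq_getElem?_getD, List.getD_eq_getElem?_getD]
  simp [h]

theorem headD_eq_getD (mapa : List (List Int)) : mapa.headD [] = mapa.getD 0 [] := by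
  cases mapa <;> simp

theorem pvRow_length (mapa : List (List Int)) (hpre : Pre_vzdalenosti_od_okraju_a_prekazek mapa)
    (y : Nat) (hy : y < mapa.length) :
    (pvRow mapa (mapa.getD 0 []).length y).length = (mapa.getD 0 []).length := by
  obtain ⟨hne, hrow⟩ := hpre
  have hmem : mapa.getD y [] ∈ mapa := by
    rw [List.getD_eq_getElem?_getD, List.getElem?_eq_getElem hy]
    exact List.getElem_mem hy
  have := hrow _ hmem
  rw [headD_eq_getD] at this
  simp only [pvRow, List.length_take]
  omega

theorem pvCol_length (mapa : List (List Int)) (x : Nat) : (pvCol mapa x).length = mapa.length := by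
  simp [pvCol]

theorem pvCellA_col (mapa : List (List Int)) (x : Nat) (ny : Int) :
    pvCellA mapa ny (x : Int) = PySem.List.pyGetD (pvCol mapa x) ny 0 := by
  have h := PySem.List.pyGetD_map (fun r : List Int => r.getD x 0) mapa ny []
  simp only [List.getD_nil] at h
  simp only [pvCellA, pvCol, h, PySem.List.pyGetD_natCast]

theorem pvCellA_row (mapa : List (List Int)) (_hpre : Pre_vzdalenosti_od_okraju_a_prekazek mapa)
    (y : Nat) (_hy : y < mapa.length) (nx : Int) (h0 : 0 ≤ nx) (h1 : nx < ((mapa.getD 0 []).length : Int)) :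
    pvCellA mapa (y : Int) nx = PySem.List.pyGetD (pvRow mapa (mapa.getD 0 []).length y) nx 0 := by
  have hx : nx = ((nx.toNat : Nat) : Int) := by omega
  rw [hx]
  simp only [pvCellA, pvRow, PySem.List.pyGetD_natCast]
  rw [getD_take _ _ _ (by omega)]

theorem pvCol_getD (mapa : List (List Int)) (y x : Nat) (hy : y < mapa.length) :
    (pvCol mapa x).getD y 0 = pvCell mapa y x := by
  simp only [pvCol, pvCell, List.getD_eq_getElem?_getD, List.getElem?_map,
    List.getElem?_eq_getElem hy]
  simp

theorem pvRow_getD (mapa : List (List Int)) (y x : Nat) (hx : x < (mapa.getD 0 []).length) :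
    (pvRow mapa (mapa.getD 0 []).length y).getD x 0 = pvCell mapa y x := by
  simp only [pvRow, pvCell, getD_take _ _ _ hx]

theorem A_eq_grid (mapa : List (List Int)) (hpre : Pre_vzdalenosti_od_okraju_a_prekazek mapa) :
    vzdalenosti_od_okraju_a_prekazek mapa = pvGrid mapa := by
  unfold vzdalenosti_od_okraju_a_prekazek pvGrid
  simp only [PySem.List.pyGetD_zero]
  rw [PySem.List.pyRange_one 0 (mapa.length : Int),
      PySem.List.pyRange_one 0 ((mapa.getD 0 []).length : Int), List.map_map]
  rw [show ((mapa.length : Int) - 0).toNat = mapa.length by omega]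
  rw [show (((mapa.getD 0 []).length : Int) - 0).toNat = (mapa.getD 0 []).length by omega]
  apply List.map_congr_left
  intro y hy
  rw [List.mem_range] at hy
  simp only [Function.comp_apply, zero_add]
  rw [List.map_map]
  apply List.map_congr_left
  intro x hx
  rw [List.mem_range] at hx
  simp only [Function.comp_apply]
  have hcell : pvCellA mapa (y : Int) (x : Int) = pvCell mapa y x := by
    simp [pvCellA, pvCell, PySem.List.pyGetD_natCast]
  rw [hcell]
  by_cases h9 : pvCell mapa y x = 9
  · simp [h9]
  · rw [if_neg h9, if_neg h9]
    have hup : ((PySem.List.pyRange ((y : Int) - 1) (-1) (-1)).map (fun ny => pvCellA mapa ny (x : Int))) =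
        ((pvCol mapa x).take y).reverse := by
      rw [show (fun ny => pvCellA mapa ny (x : Int)) = (fun ny => PySem.List.pyGetD (pvCol mapa x) ny 0) from
            funext (fun ny => pvCellA_col mapa x ny)]
      exact map_pyGetD_up _ y (by rw [pvCol_length]; omega)
    have hdown : ((PySem.List.pyRange ((y : Int) + 1) (mapa.length : Int) 1).map (fun ny => pvCellA mapa ny (x : Int))) =
        (pvCol mapa x).drop (y + 1) := by
      rw [show (fun ny => pvCellA mapa ny (x : Int)) = (fun ny => PySem.List.pyGetD (pvCol mapa x) ny 0) from
            funext (fun ny => pvCellA_col mapa x ny)]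
      rw [show (mapa.length : Int) = ((pvCol mapa x).length : Int) by rw [pvCol_length]]
      exact map_pyGetD_down _ y
    have hleft : ((PySem.List.pyRange ((x : Int) - 1) (-1) (-1)).map (fun nx => pvCellA mapa (y : Int) nx)) =
        ((pvRow mapa (mapa.getD 0 []).length y).take x).reverse := by
      have hfun : ∀ nx ∈ PySem.List.pyRange ((x : Int) - 1) (-1) (-1),
          pvCellA mapa (y : Int) nx = PySem.List.pyGetD (pvRow mapa (mapa.getD 0 []).length y) nx 0 := by
        intro nx hnx
        rw [PySem.List.mem_pyRange_neg_one] at hnx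
        exact pvCellA_row mapa hpre y hy nx (by omega) (by omega)
      rw [List.map_congr_left hfun]
      exact map_pyGetD_up _ x (by rw [pvRow_length mapa hpre y hy]; omega)
    have hright : ((PySem.List.pyRange ((x : Int) + 1) (((mapa.getD 0 []).length : Int)) 1).map (fun nx => pvCellA mapa (y : Int) nx)) =
        (pvRow mapa (mapa.getD 0 []).length y).drop (x + 1) := by
      have hfun : ∀ nx ∈ PySem.List.pyRange ((x : Int) + 1) (((mapa.getD 0 []).length : Int)) 1,
          pvCellA mapa (y : Int) nx = PySem.List.pyGetD (pvRow mapa (mapa.getD 0 []).length y) nx 0 := by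
        intro nx hnx
        rw [PySem.List.mem_pyRange_one] at hnx
        exact pvCellA_row mapa hpre y hy nx (by omega) (by omega)
      rw [List.map_congr_left hfun]
      rw [show ((mapa.getD 0 []).length : Int) = ((pvRow mapa (mapa.getD 0 []).length y).length : Int) by
            rw [pvRow_length mapa hpre y hy]]
      exact map_pyGetD_down _ x
    rw [hup, hdown, hleft, hright]
    simp [pvLoopA_cnt]

theorem getD_map_list (f : List Int → List Int) (hf : f [] = []) (l : List (List Int)) (y : Nat) :
    (l.map f).getD y [] = f (l.getD y []) := by
  by_cases hy : y < l.length
  · rw [List.getD_eq_getElem?_getD, List.getD_eq_getElem?_getD, List.getElem?_map,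
        List.getElem?_eq_getElem hy]
    simp
  · rw [List.getD_eq_getElem?_getD, List.getD_eq_getElem?_getD,
        List.getElem?_eq_none (by simpa using (by omega : l.length ≤ y)),
        List.getElem?_eq_none (by omega : l.length ≤ y)]
    simp [hf]

theorem B_eq_grid (mapa : List (List Int)) (hpre : Pre_vzdalenosti_od_okraju_a_prekazek mapa) :
    vzdalenosti_od_okraju_a_prekazek_alt mapa = pvGrid mapa := by
  obtain ⟨hne, hrowlen⟩ := hpre
  unfold vzdalenosti_od_okraju_a_prekazek_alt pvGrid
  simp only [PySem.List.pyGetD_zero]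
  have hrows : (fun r : List Int => PySem.List.slice r none (some ((mapa.getD 0 []).length : Int))) =
      (fun r : List Int => r.take (mapa.getD 0 []).length) := by
    funext r; exact PySem.List.slice_to_natCast r _
  rw [hrows]
  have hcols : (PySem.List.pyRange 0 (((mapa.getD 0 []).length : Int)) 1).map
      (fun xi => (mapa.map (fun r => r.take (mapa.getD 0 []).length)).map (fun r => PySem.List.pyGetD r xi 0)) =
      (List.range (mapa.getD 0 []).length).map (fun x => pvCol mapa x) := by
    rw [PySem.List.pyRange_one 0 (((mapa.getD 0 []).length : Int))]
    rw [show (((mapa.getD 0 []).length : Int) - 0).toNat = (mapa.getD 0 []).length by omega, List.map_map]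
    apply List.map_congr_left
    intro k hk
    rw [List.mem_range] at hk
    simp only [Function.comp_apply, zero_add, List.map_map]
    apply List.map_congr_left
    intro r hr
    simp only [Function.comp_apply, PySem.List.pyGetD_natCast]
    exact getD_take r _ k hk
  rw [hcols]
  rw [PySem.List.pyRange_one 0 (mapa.length : Int),
      PySem.List.pyRange_one 0 ((mapa.getD 0 []).length : Int), List.map_map]
  rw [show ((mapa.length : Int) - 0).toNat = mapa.length by omega]
  rw [show (((mapa.getD 0 []).length : Int) - 0).toNat = (mapa.getD 0 []).length by omega]
  apply List.map_congr_left
  intro y hy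
  rw [List.mem_range] at hy
  simp only [Function.comp_apply, zero_add]
  rw [List.map_map]
  apply List.map_congr_left
  intro x hx
  rw [List.mem_range] at hx
  simp only [Function.comp_apply]
  have hpre' : Pre_vzdalenosti_od_okraju_a_prekazek mapa := ⟨hne, hrowlen⟩
  have hrowW : (pvRow mapa (mapa.getD 0 []).length y).length = (mapa.getD 0 []).length :=
    pvRow_length mapa hpre' y hy
  have hcolH : (pvCol mapa x).length = mapa.length := pvCol_length mapa x
  -- up
  have hup : pvAtB (((List.range (mapa.getD 0 []).length).map (fun x => pvCol mapa x)).map (fun c => pvSweep c 0)) (x : Int) (y : Int) =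
      if pvCell mapa y x = 9 then 0 else pvCnt ((pvCol mapa x).take y).reverse := by
    simp only [pvAtB, PySem.List.pyGetD_natCast, List.map_map]
    rw [PySem.List.getD_map_range _ _ _ _ hx]
    simp only [Function.comp_apply]
    rw [pvSweep_getD _ y (by omega), pvCol_getD mapa y x hy]
  have hdown : pvAtB (((List.range (mapa.getD 0 []).length).map (fun x => pvCol mapa x)).map (fun c => (pvSweep c.reverse 0).reverse)) (x : Int) (y : Int) =
      if pvCell mapa y x = 9 then 0 else pvCnt ((pvCol mapa x).drop (y + 1)) := by
    simp only [pvAtB, PySem.List.pyGetD_natCast, List.map_map]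
    rw [PySem.List.getD_map_range _ _ _ _ hx]
    simp only [Function.comp_apply]
    rw [pvSweep_rev_getD _ y (by omega), pvCol_getD mapa y x hy]
  have hleft : pvAtB ((mapa.map (fun r => r.take (mapa.getD 0 []).length)).map (fun r => pvSweep r 0)) (y : Int) (x : Int) =
      if pvCell mapa y x = 9 then 0 else pvCnt ((pvRow mapa (mapa.getD 0 []).length y).take x).reverse := by
    simp only [pvAtB, PySem.List.pyGetD_natCast]
    rw [getD_map_list (fun r => pvSweep r 0) (by simp [pvSweep]) _ y,
        getD_map_list (fun r => r.take (mapa.getD 0 []).length) (by simp) mapa y,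
        show (mapa.getD y []).take (mapa.getD 0 []).length = pvRow mapa (mapa.getD 0 []).length y from rfl]
    rw [pvSweep_getD _ x (by omega), pvRow_getD mapa y x hx]
  have hright : pvAtB ((mapa.map (fun r => r.take (mapa.getD 0 []).length)).map (fun r => (pvSweep r.reverse 0).reverse)) (y : Int) (x : Int) =
      if pvCell mapa y x = 9 then 0 else pvCnt ((pvRow mapa (mapa.getD 0 []).length y).drop (x + 1)) := by
    simp only [pvAtB, PySem.List.pyGetD_natCast]
    rw [getD_map_list (fun r => (pvSweep r.reverse 0).reverse) (by simp [pvSweep]) _ y,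
        getD_map_list (fun r => r.take (mapa.getD 0 []).length) (by simp) mapa y,
        show (mapa.getD y []).take (mapa.getD 0 []).length = pvRow mapa (mapa.getD 0 []).length y from rfl]
    rw [pvSweep_rev_getD _ x (by omega), pvRow_getD mapa y x hx]
  rw [hup, hdown, hleft, hright]
  by_cases h9 : pvCell mapa y x = 9 <;> simp [h9]

-- ===== VERDICT (by name: the statement is the Claim_ definition above) =====
theorem vzdalenosti_od_okraju_a_prekazek_spec : Claim_equal_vzdalenosti_od_okraju_a_prekazek := by
  intro mapa _ hpre
  unfold Spec_vzdalenosti_od_okraju_a_prekazek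
  rw [A_eq_grid mapa hpre, B_eq_grid mapa hpre]
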